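-- pv_equiv track=rewrite | github.com/ZetangForward/Long-Context-Alignment | logo_exp_code/utils/call_llm_api.py | flatten_raw_data
-- ===== SOURCE A (Python) =====
-- def flatten_raw_data(data):
--     flatten_data = []
--     group_pairs = {}
--     i = 0
--     j = 0
--     for sample in data:
--         group_pairs[j] = []
--         for chunk in sample["chunks"]:
--             flatten_data.append((chunk, i))
--             i += 1
--             group_pairs[j].append(i)
--         j += 1
--     return flatten_data, group_pairs
-- ===== SOURCE B (Python) =====
-- def flatten_raw_data(data):
--     # staged passes: first a prefix-sum offsets table, then both outputs derived
--     # independently from it (no running counters shared between the two results)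
--     chunk_lists = [sample["chunks"] for sample in data]
--     offsets = [0]
--     for cl in chunk_lists:
--         offsets.append(offsets[-1] + len(cl))
--     flatten_data = [(chunk, off + k)
--                     for off, cl in zip(offsets, chunk_lists)
--                     for k, chunk in enumerate(cl)]
--     group_pairs = {j: list(range(lo + 1, hi + 1))
--                    for j, (lo, hi) in enumerate(zip(offsets, offsets[1:]))}
--     return flatten_data, group_pairs
-- ===== Notes on version B (the rewrite author's own statement) =====
-- stated objective: alternative
-- what changed: A makes one pass with two mutable running counters (global flat index i, group counter j) appending to both results as it goes; B is staged: it first builds a prefix-sum offsets table of chunk counts, then derives flatten_data from zip(offsets, chunk_lists) and group_pairs independently as ranges between consecutive offsets (zip(offsets, offsets[1:])).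
import Mathlib
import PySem

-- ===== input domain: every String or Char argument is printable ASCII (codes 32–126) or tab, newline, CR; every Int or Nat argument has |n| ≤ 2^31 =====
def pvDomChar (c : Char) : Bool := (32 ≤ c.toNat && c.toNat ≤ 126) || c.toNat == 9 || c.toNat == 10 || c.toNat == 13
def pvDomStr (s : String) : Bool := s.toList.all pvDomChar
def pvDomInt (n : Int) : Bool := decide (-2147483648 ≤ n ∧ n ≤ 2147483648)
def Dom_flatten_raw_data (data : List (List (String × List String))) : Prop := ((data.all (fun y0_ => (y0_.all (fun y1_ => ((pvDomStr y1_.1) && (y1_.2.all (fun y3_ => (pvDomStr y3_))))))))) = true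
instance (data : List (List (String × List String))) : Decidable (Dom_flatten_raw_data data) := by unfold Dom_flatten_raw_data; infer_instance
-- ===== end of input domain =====

-- B replaces A's single pass with two shared running counters by staged passes: a prefix-sum
-- offsets table first, then each output derived independently from it (objective: alternative).

-- ===== PORT A =====
-- the dict group_pairs is a PySem.Dict Int (List Int); 'group_pairs[j].append(i)' is the
-- read-modify-write gp.insert j (gp.getD j [] ++ [i]); the result is returned as .items.
def flatten_raw_data (data : List (List (String × List String))) : (List (String × Int)) × (List (Int × List Int)) :=
  let st := data.foldl
    (fun (st : List (String × Int) × PySem.Dict Int (List Int) × Int × Int) sample =>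
      let gp := st.2.1.insert st.2.2.2 []
      let chunks := (sample.lookup "chunks").getD []
      let st2 := chunks.foldl
        (fun (s : List (String × Int) × PySem.Dict Int (List Int) × Int) chunk =>
          let flat := s.1 ++ [(chunk, s.2.2)]
          let i := s.2.2 + 1
          (flat, s.2.1.insert st.2.2.2 (s.2.1.getD st.2.2.2 [] ++ [i]), i))
        (st.1, gp, st.2.2.1)
      (st2.1, st2.2.1, st2.2.2, st.2.2.2 + 1))
    ([], PySem.Dict.empty, 0, 0)
  (st.1, st.2.1.items)

-- ===== PORT B =====
-- offsets[-1] is read as getLast?.getD 0 (the list is never empty: it starts as [0]).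
def flatten_raw_data_alt (data : List (List (String × List String))) : (List (String × Int)) × (List (Int × List Int)) :=
  let chunkLists := data.map (fun sample => (sample.lookup "chunks").getD [])
  let offsets := chunkLists.foldl
    (fun (o : List Int) cl => o ++ [(o.getLast?.getD 0) + (cl.length : Int)]) [0]
  let flat := (offsets.zip chunkLists).flatMap
    (fun ocl => (PySem.List.enumerate ocl.2).map (fun kc => (kc.2, ocl.1 + kc.1)))
  let gp := (PySem.List.enumerate (offsets.zip (PySem.List.slice offsets (some 1) none))).map
    (fun jp => (jp.1, PySem.List.pyRange (jp.2.1 + 1) (jp.2.2 + 1) 1))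
  (flat, gp)

-- ===== PRECONDITION & SPEC =====
-- Pre_ excludes exactly the inputs where A raises KeyError: a sample with no "chunks" key.
def Pre_flatten_raw_data (data : List (List (String × List String))) : Prop :=
  ∀ s ∈ data, (s.lookup "chunks").isSome = true
instance (data : List (List (String × List String))) : Decidable (Pre_flatten_raw_data data) := by unfold Pre_flatten_raw_data; infer_instance

def pvWitness_flatten_raw_data : (List (List (String × List String))) :=
  [[("chunks", ["a", "b"])], [("chunks", [])], [("chunks", ["c"])]]

def Spec_flatten_raw_data (data : List (List (String × List String))) (out : (List (String × Int)) × (List (Int × List Int))) : Prop := out = flatten_raw_data_alt data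
instance (data : List (List (String × List String))) (out : (List (String × Int)) × (List (Int × List Int))) : Decidable (Spec_flatten_raw_data data out) := by unfold Spec_flatten_raw_data; infer_instance

-- ===== CLAIM (what is proved, stated in full; the proofs are below) =====
def Claim_equal_flatten_raw_data : Prop := ∀ (data : List (List (String × List String))), Dom_flatten_raw_data data → Pre_flatten_raw_data data → Spec_flatten_raw_data data (flatten_raw_data data)

-- ===== LEMMAS AND PROOFS =====

-- common closed form both ports are reduced to, by recursion on the list of chunk lists
def pvOffs (b : Int) : List (List String) → List Int
  | [] => []
  | c :: cs => (b + (c.length : Int)) :: pvOffs (b + (c.length : Int)) cs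

def pvSpecF (b : Int) : List (List String) → List (String × Int)
  | [] => []
  | c :: cs => (PySem.List.enumerate c).map (fun kc => (kc.2, b + kc.1)) ++ pvSpecF (b + (c.length : Int)) cs

def pvSpecG (b j : Int) : List (List String) → List (Int × List Int)
  | [] => []
  | c :: cs => (j, PySem.List.pyRange (b + 1) (b + (c.length : Int) + 1) 1) :: pvSpecG (b + (c.length : Int)) (j + 1) cs

def pvSumLen (cls : List (List String)) : Int := ((cls.map List.length).sum : Int)

theorem enumerate_shift {α : Type} (xs : List α) (s : Int) :
    PySem.List.enumerate xs (s + 1) = (PySem.List.enumerate xs s).map (fun p => (p.1 + 1, p.2)) := by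
  induction xs generalizing s with
  | nil => simp [PySem.List.enumerate_nil]
  | cons x xs ih => simp [PySem.List.enumerate_cons, ih]

theorem dict_insert_getD_self (d : PySem.Dict Int (List Int)) (k : Int)
    (h1 : d.contains k = true) (h2 : d.keys.Nodup) :
    d.insert k (d.getD k []) = d := by
  apply PySem.Dict.ext
  rw [PySem.Dict.items_insert_of_contains _ _ h1]
  conv_rhs => rw [← List.map_id d.items]
  apply List.map_congr_left
  intro p hp
  by_cases hpk : p.1 = k
  · have hv : d.getD k [] = p.2 :=
      PySem.Dict.getD_of_mem_items d (k := k) (v := p.2) (by rw [← hpk]; exact hp) h2 []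
    simp only [hpk, beq_self_eq_true, if_true, hv, id]
    rw [← hpk]
  · simp [hpk]

theorem inner_loop (j : Int) (chunks : List String) :
    ∀ (flat : List (String × Int)) (gp : PySem.Dict Int (List Int)),
      gp.contains j = true → gp.keys.Nodup →
      chunks.foldl
        (fun (s : List (String × Int) × PySem.Dict Int (List Int) × Int) chunk =>
          let flat := s.1 ++ [(chunk, s.2.2)]
          let i := s.2.2 + 1
          (flat, s.2.1.insert j (s.2.1.getD j [] ++ [i]), i))
        (flat, gp, (flat.length : Int))
      = (flat ++ (PySem.List.enumerate chunks).map (fun kc => (kc.2, (flat.length : Int) + kc.1)),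
         gp.insert j (gp.getD j [] ++ PySem.List.pyRange ((flat.length : Int) + 1) ((flat.length : Int) + chunks.length + 1) 1),
         (flat.length : Int) + chunks.length) := by
  induction chunks with
  | nil =>
    intro flat gp hc hn
    simp only [List.foldl_nil, List.length_nil, PySem.List.enumerate_nil, List.map_nil,
      List.append_nil, Int.natCast_zero, add_zero]
    rw [PySem.List.pyRange_one_eq_nil (by omega), List.append_nil, dict_insert_getD_self gp j hc hn]
  | cons c cs ih =>
    intro flat gp hc hn
    rw [List.foldl_cons]
    have hlen : ((flat ++ [(c, (flat.length : Int))]).length : Int) = (flat.length : Int) + 1 := by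
      simp
    show List.foldl _
        (flat ++ [(c, (flat.length : Int))],
         gp.insert j (gp.getD j [] ++ [(flat.length : Int) + 1]),
         (flat.length : Int) + 1) cs = _
    rw [← hlen, ih (flat ++ [(c, (flat.length : Int))]) _
      (by simp [PySem.Dict.contains_insert_self]) (PySem.Dict.nodup_keys_insert _ _ _ hn)]
    refine Prod.ext ?_ (Prod.ext ?_ ?_) <;> simp only []
    · rw [PySem.List.enumerate_cons, List.map_cons, enumerate_shift, List.map_map]
      simp only [List.append_assoc, List.singleton_append]
      have hmap : List.map (fun kc => (kc.2, (flat.length : ℤ) + 1 + kc.1)) (PySem.List.enumerate cs)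
          = List.map ((fun (kc : ℤ × String) => (kc.2, (flat.length : ℤ) + kc.1)) ∘ fun p => (p.1 + 1, p.2)) (PySem.List.enumerate cs) := by
        apply List.map_congr_left
        intro p _
        simp only [Function.comp_apply, Prod.mk.injEq, true_and]
        ring
      rw [hlen, hmap]
      norm_num
    · rw [PySem.Dict.getD_insert_self, PySem.Dict.insert_insert_self, hlen]
      congr 1
      rw [List.append_assoc]
      congr 1
      rw [PySem.List.pyRange_one_cons (show (flat.length : Int) + 1 < (flat.length : Int) + ((c :: cs).length : Int) + 1 by push_cast [List.length_cons]; omega)]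
      simp only [List.singleton_append, List.cons.injEq, true_and]
      congr 1
      push_cast [List.length_cons]
      ring
    · rw [hlen]
      push_cast [List.length_cons]
      ring

theorem outer_loop (data : List (List (String × List String))) :
    ∀ (flat : List (String × Int)) (gp : PySem.Dict Int (List Int)) (j : Int),
      (∀ k ∈ gp.keys, k < j) → gp.keys.Nodup →
      (data.foldl
        (fun (st : List (String × Int) × PySem.Dict Int (List Int) × Int × Int) sample =>
          let gp := st.2.1.insert st.2.2.2 []
          let chunks := (sample.lookup "chunks").getD []
          let st2 := chunks.foldl
            (fun (s : List (String × Int) × PySem.Dict Int (List Int) × Int) chunk =>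
              let flat := s.1 ++ [(chunk, s.2.2)]
              let i := s.2.2 + 1
              (flat, s.2.1.insert st.2.2.2 (s.2.1.getD st.2.2.2 [] ++ [i]), i))
            (st.1, gp, st.2.2.1)
          (st2.1, st2.2.1, st2.2.2, st.2.2.2 + 1))
        (flat, gp, (flat.length : Int), j))
      = (flat ++ pvSpecF (flat.length : Int) (data.map (fun s => (s.lookup "chunks").getD [])),
         PySem.Dict.mk (gp.items ++ pvSpecG (flat.length : Int) j (data.map (fun s => (s.lookup "chunks").getD []))),
         (flat.length : Int) + pvSumLen (data.map (fun s => (s.lookup "chunks").getD [])),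
         j + data.length) := by
  induction data with
  | nil =>
    intro flat gp j _ _
    simp only [List.foldl_nil, List.map_nil, pvSpecF, pvSpecG, pvSumLen, List.sum_nil,
      List.append_nil, Int.natCast_zero, add_zero, List.length_nil]
  | cons sample ds ih =>
    intro flat gp j hlt hn
    have hcont : gp.contains j = false := by
      rw [← Bool.not_eq_true]
      intro hco
      exact absurd rfl (Int.ne_of_lt (hlt j ((PySem.Dict.contains_iff_mem_keys gp j).mp hco)))
    have hin := inner_loop j ((sample.lookup "chunks").getD []) flat (gp.insert j [])
      (PySem.Dict.contains_insert_self _ _ _) (PySem.Dict.nodup_keys_insert _ _ _ hn)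
    simp only [List.foldl_cons]
    rw [hin]
    simp only []
    have hgp : (gp.insert j []).insert j
        ((gp.insert j []).getD j [] ++ PySem.List.pyRange ((flat.length : Int) + 1) ((flat.length : Int) + (((List.lookup "chunks" sample).getD []).length : Int) + 1) 1)
        = gp.insert j (PySem.List.pyRange ((flat.length : Int) + 1) ((flat.length : Int) + (((List.lookup "chunks" sample).getD []).length : Int) + 1) 1) := by
      rw [PySem.Dict.getD_insert_self, PySem.Dict.insert_insert_self, List.nil_append]
    rw [hgp]
    have hflen : (flat.length : Int) + (((List.lookup "chunks" sample).getD []).length : Int)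
        = ((flat ++ List.map (fun kc => (kc.2, (flat.length : Int) + kc.1))
            (PySem.List.enumerate ((List.lookup "chunks" sample).getD []))).length : Int) := by
      simp
    rw [hflen]
    rw [ih _ _ (j + 1)
      (by
        intro k hk
        rcases (PySem.Dict.mem_keys_insert _ _ _ _).mp hk with h | h
        · omega
        · have := hlt k h; omega)
      (PySem.Dict.nodup_keys_insert _ _ _ hn)]
    rw [PySem.Dict.items_insert_of_not_contains _ _ hcont]
    simp only [List.map_cons, pvSpecF, pvSpecG, pvSumLen, List.sum_cons, ← hflen,
      Prod.mk.injEq]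
    refine ⟨by rw [List.append_assoc], ?_, ?_, by push_cast [List.length_cons]; ring⟩
    · rw [List.append_assoc, List.singleton_append]
    · push_cast
      ring

-- B-side: the offsets foldl produces the prefix-sum list pvOffs
theorem offs_foldl (cls : List (List String)) :
    ∀ (o : List Int) (b : Int), o.getLast? = some b →
      cls.foldl (fun (o : List Int) cl => o ++ [(o.getLast?.getD 0) + (cl.length : Int)]) o
      = o ++ pvOffs b cls := by
  induction cls with
  | nil => intro o b _; simp [pvOffs]
  | cons c cs ih =>
    intro o b hb
    rw [List.foldl_cons]
    simp only [hb, Option.getD_some]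
    rw [ih (o ++ [b + (c.length : Int)]) (b + (c.length : Int)) (by simp)]
    simp [pvOffs]

theorem zip_flat (cls : List (List String)) :
    ∀ (b : Int),
      ((b :: pvOffs b cls).zip cls).flatMap
        (fun ocl => (PySem.List.enumerate ocl.2).map (fun kc => (kc.2, ocl.1 + kc.1)))
      = pvSpecF b cls := by
  induction cls with
  | nil => intro b; simp [pvSpecF]
  | cons c cs ih =>
    intro b
    simp only [pvOffs, List.zip_cons_cons, List.flatMap_cons, pvSpecF]
    rw [ih (b + (c.length : Int))]

theorem zip_gp (cls : List (List String)) :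
    ∀ (b j : Int),
      (PySem.List.enumerate ((b :: pvOffs b cls).zip (pvOffs b cls)) j).map
        (fun jp => (jp.1, PySem.List.pyRange (jp.2.1 + 1) (jp.2.2 + 1) 1))
      = pvSpecG b j cls := by
  induction cls with
  | nil => intro b j; simp [pvOffs, PySem.List.enumerate_nil, pvSpecG]
  | cons c cs ih =>
    intro b j
    simp only [pvOffs, List.zip_cons_cons, PySem.List.enumerate_cons, List.map_cons, pvSpecG]
    exact congrArg _ (ih (b + (c.length : Int)) (j + 1))

theorem alt_closed (data : List (List (String × List String))) :
    flatten_raw_data_alt data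
      = (pvSpecF 0 (data.map (fun s => (s.lookup "chunks").getD [])),
         pvSpecG 0 0 (data.map (fun s => (s.lookup "chunks").getD []))) := by
  show (let chunkLists := data.map (fun sample => (sample.lookup "chunks").getD [])
        let offsets := chunkLists.foldl
          (fun (o : List Int) cl => o ++ [(o.getLast?.getD 0) + (cl.length : Int)]) [0]
        let flat := (offsets.zip chunkLists).flatMap
          (fun ocl => (PySem.List.enumerate ocl.2).map (fun kc => (kc.2, ocl.1 + kc.1)))
        let gp := (PySem.List.enumerate (offsets.zip (PySem.List.slice offsets (some 1) none))).map
          (fun jp => (jp.1, PySem.List.pyRange (jp.2.1 + 1) (jp.2.2 + 1) 1))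
        (flat, gp)) = _
  simp only []
  rw [offs_foldl _ [0] 0 rfl]
  simp only [List.singleton_append, PySem.List.slice_from_one, List.tail_cons]
  rw [zip_flat, zip_gp]

-- ===== VERDICT (by name: the statement is the Claim_ definition above) =====
theorem flatten_raw_data_spec : Claim_equal_flatten_raw_data := by
  intro data _ _
  unfold Spec_flatten_raw_data flatten_raw_data
  have h := outer_loop data [] PySem.Dict.empty 0
    (by intro k hk; simp [PySem.Dict.keys_empty] at hk)
    (by simp [PySem.Dict.keys_empty])
  simp only [List.length_nil, Int.natCast_zero] at h
  simp only []
  rw [h, alt_closed]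
  rfl
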